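-- pv_equiv track=rewrite | github.com/ileenf/Data-Structures-Algos | Stack/repeated_deletion.py | solve
-- ===== SOURCE A (Python) =====
-- def solve(s, k):
--     if k == 1:
--         return ''
--
--     stack = []
--
--     for ch in s:
--         if not stack:
--             stack.append([ch, 1])
--         else:
--             if stack:
--                 prev_ch, count = stack[-1]
--
--                 if prev_ch == ch:
--                     count += 1
--                     stack.pop()
--
--                     if count == k:
--                         continue
--                     else:
--                         stack.append([prev_ch, count])
--                 else:
--                     stack.append([ch, 1])
--
--     result = ''
--     for ch, count in stack:
--         for _ in range(count):
--             result += ch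
--     return result
-- ===== SOURCE B (Python) =====
-- def solve(s, k):
--     if k == 1:
--         return ''
--     if k <= 0:
--         return s
--     while True:
--         i = _first_run(s, k)
--         if i is None:
--             return s
--         s = s[:i] + s[i + k:]
--
-- def _first_run(s, k):
--     for i in range(len(s) - k + 1):
--         if s[i:i + k] == s[i] * k:
--             return i
--     return None
-- ===== Notes on version B (the rewrite author's own statement) =====
-- stated objective: alternative
-- what changed: A's single-pass run-length stack is replaced by a naive fixpoint that repeatedly rescans the string for the first k adjacent equal characters and splices them out until none remain.
import Mathlib
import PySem

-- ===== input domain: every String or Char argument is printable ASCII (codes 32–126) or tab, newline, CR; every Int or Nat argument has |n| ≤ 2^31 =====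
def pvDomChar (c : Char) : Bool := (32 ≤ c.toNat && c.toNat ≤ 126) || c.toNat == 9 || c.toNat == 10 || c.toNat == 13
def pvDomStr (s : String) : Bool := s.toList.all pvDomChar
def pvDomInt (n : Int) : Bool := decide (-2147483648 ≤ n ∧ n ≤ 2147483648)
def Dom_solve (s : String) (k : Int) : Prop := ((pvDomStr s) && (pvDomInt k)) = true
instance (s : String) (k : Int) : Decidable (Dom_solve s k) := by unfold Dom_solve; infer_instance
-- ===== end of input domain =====

-- B replaces A's one-pass run-length stack by the naive rescanning fixpoint (find the
-- first k-run, splice it out, restart); objective: alternative algorithm, same results.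

-- ===== PORT A =====
-- one loop iteration of A; the stack's top (Python stack[-1]) is our list head
def stepA (k : Int) (st : List (Char × Int)) (ch : Char) : List (Char × Int) :=
  match st with
  | [] => [(ch, 1)]
  | (prev_ch, count) :: rest =>
      if prev_ch = ch then
        if count + 1 = k then rest            -- pop; count reached k: continue
        else (prev_ch, count + 1) :: rest     -- pop, then re-append with count+1
      else (ch, 1) :: (prev_ch, count) :: rest

-- A's final loop: result += ch repeated count times (= List.replicate);
-- the stack is iterated bottom-to-top, i.e. our list reversed
def rendA (st : List (Char × Int)) : List Char :=
  st.reverse.foldl (fun r p => r ++ List.replicate p.2.toNat p.1) []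

def solve (s : String) (k : Int) : String :=
  if k = 1 then ""
  else String.ofList (rendA (s.toList.foldl (stepA k) []))

-- ===== PORT B =====
-- B's _first_run: first index i with s[i:i+k] == s[i]*k (the slice is drop/take: i, k ≥ 0 and in range)
def findRun (cs : List Char) (k : Nat) : Option Nat :=
  (List.range (cs.length - k + 1)).find?
    (fun i => (cs.drop i).take k = List.replicate k (cs.getD i ' '))

-- termination fact for the while-loop (used by fixLoop's decreasing_by)
theorem findRun_some_lt {cs : List Char} {k i : Nat} (hk : 1 ≤ k)
    (h : findRun cs k = some i) :
    (cs.take i ++ cs.drop (i + k)).length < cs.length := by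
  have hmem := List.mem_of_find?_eq_some h
  have hp := List.find?_some h
  simp only [List.mem_range] at hmem
  simp only [decide_eq_true_eq] at hp
  have hlen : ((cs.drop i).take k).length = (List.replicate k (cs.getD i ' ')).length := by
    rw [hp]
  simp [List.length_take, List.length_drop, List.length_replicate] at hlen ⊢
  omega

-- B's while-loop: splice out the first k-run and rescan (1 ≤ k is guaranteed by solve_alt)
def fixLoop (k : Nat) (hk : 1 ≤ k) (cs : List Char) : List Char :=
  match h : findRun cs k with
  | none => cs
  | some i => fixLoop k hk (cs.take i ++ cs.drop (i + k))
termination_by cs.length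
decreasing_by exact findRun_some_lt hk h

def solve_alt (s : String) (k : Int) : String :=
  if k = 1 then ""
  else if hk : k ≤ 0 then s
  else String.ofList (fixLoop k.toNat (by omega) s.toList)

-- ===== PRECONDITION & SPEC =====
def Spec_solve (s : String) (k : Int) (out : String) : Prop := out = solve_alt s k
instance (s : String) (k : Int) (out : String) : Decidable (Spec_solve s k out) := by unfold Spec_solve; infer_instance

-- ===== CLAIM (what is proved, stated in full; the proofs are below) =====
def Claim_equal_solve : Prop := ∀ (s : String) (k : Int), Dom_solve s k → Spec_solve s k (solve s k)

-- ===== LEMMAS AND PROOFS =====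

theorem rendA_cons (p : Char × Int) (rest : List (Char × Int)) :
    rendA (p :: rest) = rendA rest ++ List.replicate p.2.toNat p.1 := by
  simp [rendA, List.foldl_append]

-- counts are positive
def PosC (st : List (Char × Int)) : Prop := ∀ p ∈ st, 1 ≤ p.2

theorem posC_step (k : Int) (st : List (Char × Int)) (ch : Char) (h : PosC st) :
    PosC (stepA k st ch) := by
  match st with
  | [] => intro p hp; simp [stepA] at hp; simp [hp]
  | (q, n) :: rest =>
    have hq : 1 ≤ n := h (q, n) (by simp)
    intro p hp
    simp only [stepA] at hp
    split at hp
    · split at hp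
      · exact h p (List.mem_cons_of_mem _ hp)
      · rcases List.mem_cons.mp hp with h1 | h1
        · simp [h1]; omega
        · exact h p (List.mem_cons_of_mem _ h1)
    · rcases List.mem_cons.mp hp with h1 | h1
      · simp [h1]
      · exact h p h1

-- a step on which no pop fires appends one character to the rendered stack
theorem rendA_step_no_pop (k : Int) (st : List (Char × Int)) (c : Char) (h1 : PosC st)
    (hnp : ∀ n rest, st = (c, n) :: rest → n + 1 ≠ k) :
    rendA (stepA k st c) = rendA st ++ [c] := by
  match st with
  | [] => simp [stepA, rendA_cons, rendA]
  | (q, n) :: rest =>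
    have hq : 1 ≤ n := h1 (q, n) (by simp)
    by_cases hqc : q = c
    · subst hqc
      have hne : ¬ (n + 1 = k) := hnp n rest rfl
      simp only [stepA, if_pos rfl, if_neg hne, if_true]
      rw [rendA_cons, rendA_cons]
      have : (n + 1).toNat = n.toNat + 1 := by omega
      simp only [this, List.replicate_succ']
      simp
    · simp only [stepA, if_neg hqc]
      rw [rendA_cons, rendA_cons]
      simp

-- k ≤ 0: no pop ever fires, the stack re-encodes the whole input
theorem foldl_stepA_nonpos (k : Int) (hk : k ≤ 0) :
    ∀ (cs : List Char) (st : List (Char × Int)), PosC st →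
      rendA (cs.foldl (stepA k) st) = rendA st ++ cs := by
  intro cs
  induction cs with
  | nil => intro st _; simp
  | cons c cs ih =>
    intro st hst
    simp only [List.foldl_cons]
    rw [ih _ (posC_step k st c hst)]
    rw [rendA_step_no_pop k st c hst (by intro n rest hrest; have := hst (c, n) (by simp [hrest]); omega)]
    simp

-- k ≥ 2 and no k-run anywhere in (rendered stack ++ rest): no pop fires
theorem foldl_stepA_noRun (k : Int) (hk : 2 ≤ k) :
    ∀ (cs : List Char) (st : List (Char × Int)), PosC st →
      (∀ c : Char, ¬ (List.replicate k.toNat c <:+: rendA st ++ cs)) →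
      rendA (cs.foldl (stepA k) st) = rendA st ++ cs := by
  intro cs
  induction cs with
  | nil => intro st _ _; simp
  | cons c cs ih =>
    intro st hst hrun
    have hnp : ∀ n rest, st = (c, n) :: rest → n + 1 ≠ k := by
      intro n rest hrest heq
      have hn : 1 ≤ n := hst (c, n) (by simp [hrest])
      apply hrun c
      refine ⟨rendA rest, cs, ?_⟩
      subst hrest
      rw [rendA_cons]
      have : k.toNat = n.toNat + 1 := by omega
      rw [this, List.replicate_succ']
      simp
    have hrend := rendA_step_no_pop k st c hst hnp
    simp only [List.foldl_cons]
    rw [ih _ (posC_step k st c hst) (by rw [hrend]; simpa using hrun), hrend]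
    simp

-- feeding m copies of the top char, staying below k
theorem foldl_stepA_inc (k : Int) :
    ∀ (m : Nat) (n : Int) (c : Char) (rest : List (Char × Int)), n + m ≤ k - 1 →
      (List.replicate m c).foldl (stepA k) ((c, n) :: rest) = (c, n + m) :: rest := by
  intro m
  induction m with
  | zero => intro n c rest _; simp
  | succ m ih =>
    intro n c rest hm
    rw [List.replicate_succ, List.foldl_cons]
    have h1 : ¬ (n + 1 = k) := by push_cast at hm; omega
    simp only [stepA, if_pos rfl, if_neg h1, if_true]
    rw [ih (n + 1) c rest (by push_cast at hm ⊢; omega)]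
    congr 2
    push_cast; ring

-- feeding exactly enough copies of the top char to pop it
theorem foldl_stepA_pop (k : Int) :
    ∀ (m : Nat) (n : Int) (c : Char) (rest : List (Char × Int)), 1 ≤ m → n + m = k →
      (List.replicate m c).foldl (stepA k) ((c, n) :: rest) = rest := by
  intro m
  induction m with
  | zero => intro n c rest h; omega
  | succ m ih =>
    intro n c rest _ hm
    rw [List.replicate_succ, List.foldl_cons]
    by_cases h0 : m = 0
    · subst h0
      have h1 : n + 1 = k := by push_cast at hm; omega
      simp [stepA, h1]
    · have h1 : ¬ (n + 1 = k) := by push_cast at hm; omega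
      simp only [stepA, if_pos rfl, if_neg h1, if_true]
      exact ih (n + 1) c rest (by omega) (by push_cast at hm ⊢; omega)

-- feeding m ≤ k-1 copies of a char foreign to the stack top just pushes the run
theorem foldl_stepA_fresh (k : Int) (m : Nat) (c : Char) (st : List (Char × Int))
    (hm1 : 1 ≤ m) (hmk : (m : Int) ≤ k - 1)
    (hhead : ∀ p ∈ st.head?, p.1 ≠ c) :
    (List.replicate m c).foldl (stepA k) st = (c, (m : Int)) :: st := by
  obtain ⟨m', rfl⟩ : ∃ m', m = m' + 1 := ⟨m - 1, by omega⟩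
  rw [List.replicate_succ, List.foldl_cons]
  have hstep : stepA k st c = (c, 1) :: st := by
    match st with
    | [] => rfl
    | (q, n) :: rest =>
      have : q ≠ c := hhead (q, n) (by simp)
      simp [stepA, this]
  rw [hstep, foldl_stepA_inc k m' 1 c st (by push_cast at hmk ⊢; omega)]
  congr 2
  push_cast; ring

-- full invariant for k ≥ 2: counts in [1, k-1], adjacent chars distinct
def InvK (k : Int) (st : List (Char × Int)) : Prop :=
  (∀ p ∈ st, 1 ≤ p.2 ∧ p.2 ≤ k - 1) ∧ st.IsChain (fun a b => a.1 ≠ b.1)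

theorem invK_step (k : Int) (hk : 2 ≤ k) (st : List (Char × Int)) (ch : Char)
    (hinv : InvK k st) : InvK k (stepA k st ch) := by
  obtain ⟨hb, hc⟩ := hinv
  match st with
  | [] =>
    refine ⟨?_, List.IsChain.singleton _⟩
    intro p hp; simp [stepA] at hp; simp [hp]; omega
  | (q, n) :: rest =>
    have hq := hb (q, n) (by simp)
    by_cases hqc : q = ch
    · subst hqc
      by_cases hpop : n + 1 = k
      · simp only [stepA, if_pos rfl, if_pos hpop, if_true]
        exact ⟨fun p hp => hb p (List.mem_cons_of_mem _ hp), hc.tail⟩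
      · simp only [stepA, if_pos rfl, if_neg hpop, if_true]
        refine ⟨?_, ?_⟩
        · intro p hp
          rcases List.mem_cons.mp hp with h1 | h1
          · simp [h1]; omega
          · exact hb p (List.mem_cons_of_mem _ h1)
        · match rest, hc with
          | [], _ => exact List.IsChain.singleton _
          | r :: t, hc =>
            exact List.isChain_cons_cons.mpr
              ⟨(List.isChain_cons_cons.mp hc).1, (List.isChain_cons_cons.mp hc).2⟩
    · simp only [stepA, if_neg hqc]
      refine ⟨?_, List.isChain_cons_cons.mpr ⟨fun h => hqc h.symm, hc⟩⟩
      intro p hp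
      rcases List.mem_cons.mp hp with h1 | h1
      · simp [h1]; omega
      · exact hb p h1

theorem invK_foldl (k : Int) (hk : 2 ≤ k) (cs : List Char) (st : List (Char × Int))
    (hinv : InvK k st) : InvK k (cs.foldl (stepA k) st) := by
  induction cs generalizing st with
  | nil => exact hinv
  | cons c cs ih => exact ih _ (invK_step k hk st c hinv)

-- the central cancellation: a block of k equal chars leaves a well-formed stack unchanged
theorem foldl_stepA_absorb (k : Int) (hk : 2 ≤ k) (c : Char) (st : List (Char × Int))
    (hinv : InvK k st) :
    (List.replicate k.toNat c).foldl (stepA k) st = st := by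
  match st with
  | [] =>
    have : k.toNat = 1 + (k.toNat - 1) := by omega
    rw [this, List.replicate_add, List.foldl_append]
    simp only [List.replicate_one, List.foldl_cons, List.foldl_nil]
    have hstep : stepA k [] c = [(c, 1)] := rfl
    rw [hstep, foldl_stepA_pop k (k.toNat - 1) 1 c [] (by omega) (by push_cast; omega)]
  | (q, n) :: rest =>
    obtain ⟨hb, hc⟩ := hinv
    have hq := hb (q, n) (by simp)
    by_cases hqc : q = c
    · rw [← hqc]
      have hsplit : k.toNat = (k - n).toNat + n.toNat := by omega
      rw [hsplit, List.replicate_add, List.foldl_append]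
      rw [foldl_stepA_pop k ((k - n).toNat) n q rest (by omega) (by push_cast; omega)]
      rw [foldl_stepA_fresh k n.toNat q rest (by omega) (by push_cast; omega) ?_]
      · congr 2; omega
      · intro p hp
        cases rest with
        | nil => simp at hp
        | cons r t =>
          have hne := (List.isChain_cons_cons.mp hc).1
          simp only [List.head?_cons, Option.mem_def, Option.some.injEq] at hp
          subst hp
          exact fun h => hne h.symm
    · have : k.toNat = 1 + (k.toNat - 1) := by omega
      rw [this, List.replicate_add, List.foldl_append]
      simp only [List.replicate_one, List.foldl_cons, List.foldl_nil]
      have hstep : stepA k ((q, n) :: rest) c = (c, 1) :: (q, n) :: rest := by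
        simp [stepA, hqc]
      rw [hstep, foldl_stepA_pop k (k.toNat - 1) 1 c _ (by omega) (by push_cast; omega)]

-- findRun = none means no k consecutive equal characters
theorem findRun_none (cs : List Char) (k : Nat) (hk : 1 ≤ k)
    (h : findRun cs k = none) : ∀ c : Char, ¬ (List.replicate k c <:+: cs) := by
  intro c hinf
  obtain ⟨x, y, hxy⟩ := hinf
  unfold findRun at h
  rw [List.find?_eq_none] at h
  have hx : x.length ∈ List.range (cs.length - k + 1) := by
    rw [List.mem_range]
    have : cs.length = x.length + k + y.length := by
      rw [← hxy]; simp; omega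
    omega
  apply h _ hx
  have hdrop : cs.drop x.length = List.replicate k c ++ y := by
    rw [← hxy, List.append_assoc, List.drop_left]
  have hget : cs.getD x.length ' ' = c := by
    have hsome : cs[x.length]? = some c := by
      rw [← hxy, List.append_assoc, List.getElem?_append_right (Nat.le_refl _)]
      cases k with
      | zero => omega
      | succ k => simp [List.replicate_succ]
    simp [List.getD, hsome]
  rw [hget, decide_eq_true_eq, hdrop, List.take_left' (by simp)]

-- findRun = some i exhibits the run
theorem findRun_some_decomp {cs : List Char} {k i : Nat}
    (h : findRun cs k = some i) :
    cs = cs.take i ++ List.replicate k (cs.getD i ' ') ++ cs.drop (i + k) := by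
  have hp := List.find?_some h
  simp only [decide_eq_true_eq] at hp
  conv_lhs => rw [← List.take_append_drop i cs, ← List.take_append_drop k (cs.drop i)]
  rw [hp, List.drop_drop, List.append_assoc]

-- a k-block in the middle cancels out of the stack pass
theorem foldl_absorb_mid (k : Int) (hk : 2 ≤ k) (x y : List Char) (c : Char) :
    (x ++ List.replicate k.toNat c ++ y).foldl (stepA k) [] =
      (x ++ y).foldl (stepA k) [] := by
  rw [List.foldl_append, List.foldl_append, List.foldl_append]
  rw [foldl_stepA_absorb k hk c _ (invK_foldl k hk x [] ⟨by simp, by constructor⟩)]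

-- main lemma for k ≥ 2: the stack pass equals the rescanning fixpoint
theorem stack_eq_fixLoop (k : Int) (hk : 2 ≤ k) (h1 : 1 ≤ k.toNat) :
    ∀ (cs : List Char),
      rendA (cs.foldl (stepA k) []) = fixLoop k.toNat h1 cs := by
  intro cs
  induction cs using fixLoop.induct k.toNat h1 with
  | case1 cs hnone =>
    rw [fixLoop, hnone]
    have hnr := findRun_none cs k.toNat h1 hnone
    have h2 := foldl_stepA_noRun k hk cs [] (by intro p hp; simp at hp)
      (by intro c; simpa [rendA] using hnr c)
    simpa [rendA] using h2
  | case2 cs i hsome ih =>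
    rw [fixLoop, hsome]
    have hdec := findRun_some_decomp hsome
    have e1 : cs.foldl (stepA k) [] =
        (cs.take i ++ cs.drop (i + k.toNat)).foldl (stepA k) [] := by
      conv_lhs => rw [hdec]
      exact foldl_absorb_mid k hk (cs.take i) (cs.drop (i + k.toNat)) (cs.getD i ' ')
    rw [e1]
    exact ih

-- ===== VERDICT (by name: the statement is the Claim_ definition above) =====
theorem solve_spec : Claim_equal_solve := by
  intro s k _
  unfold Spec_solve solve solve_alt
  by_cases h1 : k = 1
  · simp [h1]
  · simp only [h1, if_false]
    by_cases h0 : k ≤ 0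
    · rw [dif_pos h0]
      rw [foldl_stepA_nonpos k h0 s.toList [] (by intro p hp; simp at hp)]
      simp [rendA, String.ofList_toList]
    · rw [dif_neg h0]
      have hk : 2 ≤ k := by omega
      rw [stack_eq_fixLoop k hk (by omega) s.toList]
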